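-- pv_equiv track=rewrite | github.com/quoctruong247/hoc_ky_he | python/bt_ki_nang.py | tongCD
-- ===== SOURCE A (Python) =====
-- def tongCD(num):
--     numl = numtemp = tong11 = 0
--     while num:
--         numl = int(num % 10)
--         num = int(num / 10)
--         numtemp = int(num % 10)
--         num = int(num / 10)
--         if int(num % 10) < numtemp > numl:
--             tong11 += numtemp
--     return tong11
-- ===== SOURCE B (Python) =====
-- def tongCD(num):
--     # Phase 1: extract the digit list with the exact same ops A uses.
--     digits = []
--     while num:
--         digits.append(int(num % 10))
--         num = int(num / 10)
--     # Phase 2: every odd position is a candidate "middle" digit; add it when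
--     # it is strictly greater than both neighbours (missing right neighbour = 0).
--     total = 0
--     i = 1
--     while i < len(digits):
--         lo = digits[i - 1]
--         mid = digits[i]
--         hi = digits[i + 1] if i + 1 < len(digits) else 0
--         if hi < mid > lo:
--             total += mid
--         i += 2
--     return total
-- ===== Notes on version B (the rewrite author's own statement) =====
-- stated objective: alternative
-- what changed: A's single loop interleaves two divisions per iteration and peeks at the undivided remainder for the right neighbour; B first extracts the full digit list and then makes a separate indexed pass over the odd positions, comparing each middle digit with its two neighbours in the list.
import Mathlib
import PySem

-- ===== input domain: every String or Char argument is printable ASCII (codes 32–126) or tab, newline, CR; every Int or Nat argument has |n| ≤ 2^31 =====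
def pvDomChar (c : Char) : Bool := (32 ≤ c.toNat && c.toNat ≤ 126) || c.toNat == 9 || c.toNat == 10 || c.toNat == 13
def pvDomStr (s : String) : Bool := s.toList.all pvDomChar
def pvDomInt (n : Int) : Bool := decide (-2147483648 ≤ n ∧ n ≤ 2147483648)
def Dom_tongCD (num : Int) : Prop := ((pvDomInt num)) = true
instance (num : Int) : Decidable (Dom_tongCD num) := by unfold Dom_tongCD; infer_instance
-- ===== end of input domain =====

-- B re-decomposes A's interleaved divide-and-peek loop into two phases (extract the digit
-- list, then scan the odd positions against their neighbours); same cost, proved equal.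
-- Python's `int(num % 10)` is PySem.Int.mod (int() is the identity on it) and
-- `int(num / 10)` is PySem.Int.truncdiv, exact for |num| ≤ 2^31 < 2^53.

-- ===== PORT A =====
-- the while loop; numl/numtemp are (re)assigned before every use, so the carried state is (num, tong11)
def tongCDLoop (num tong11 : Int) : Int :=
  if _h : num = 0 then tong11
  else
    let numl := PySem.Int.mod num 10
    let num1 := PySem.Int.truncdiv num 10
    let numtemp := PySem.Int.mod num1 10
    let num2 := PySem.Int.truncdiv num1 10
    tongCDLoop num2
      (if PySem.Int.mod num2 10 < numtemp ∧ numtemp > numl then tong11 + numtemp else tong11)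
termination_by num.natAbs
decreasing_by
  simp only [PySem.Int.truncdiv, Int.natAbs_tdiv]
  exact lt_of_le_of_lt (Nat.div_le_self _ _)
    (Nat.div_lt_self (Int.natAbs_pos.mpr _h) (by norm_num))

def tongCD (num : Int) : Int := tongCDLoop num 0

-- ===== PORT B =====
-- phase 1: `while num: digits.append(int(num % 10)); num = int(num / 10)`
def digitsLoop (num : Int) : List Int :=
  if _h : num = 0 then []
  else PySem.Int.mod num 10 :: digitsLoop (PySem.Int.truncdiv num 10)
termination_by num.natAbs
decreasing_by
  simp only [PySem.Int.truncdiv, Int.natAbs_tdiv]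
  exact Nat.div_lt_self (Int.natAbs_pos.mpr _h) (by norm_num)

-- phase 2: `while i < len(digits): …; i += 2`  (indices i-1, i are always in range here,
-- and i+1 is guarded, so pyGetD with default 0 is exact)
def sumLoop (digits : List Int) (i total : Int) : Int :=
  if i < (digits.length : Int) then
    let lo := PySem.List.pyGetD digits (i - 1) 0
    let mid := PySem.List.pyGetD digits i 0
    let hi := if i + 1 < (digits.length : Int) then PySem.List.pyGetD digits (i + 1) 0 else 0
    sumLoop digits (i + 2) (if hi < mid ∧ mid > lo then total + mid else total)
  else total
termination_by ((digits.length : Int) - i).toNat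
decreasing_by omega

def tongCD_alt (num : Int) : Int := sumLoop (digitsLoop num) 1 0

-- ===== PRECONDITION & SPEC =====
def Spec_tongCD (num : Int) (out : Int) : Prop := out = tongCD_alt num
instance (num : Int) (out : Int) : Decidable (Spec_tongCD num out) := by unfold Spec_tongCD; infer_instance

-- ===== CLAIM (what is proved, stated in full; the proofs are below) =====
def Claim_equal_tongCD : Prop := ∀ (num : Int), Dom_tongCD num → Spec_tongCD num (tongCD num)

-- ===== LEMMAS AND PROOFS =====

-- common characterisation: sum over consecutive digit pairs (lo, mid), the right
-- neighbour being the head of the remaining digits (0 when exhausted)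
def pairSum : List Int → Int
  | [] => 0
  | [_] => 0
  | a :: b :: rest => (if rest.headD 0 < b ∧ b > a then b else 0) + pairSum rest

theorem digitsLoop_headD (num : Int) :
    (digitsLoop num).headD 0 = PySem.Int.mod num 10 := by
  rw [digitsLoop.eq_def]
  split
  · simp [*, PySem.Int.mod]
  · simp

theorem tongCDLoop_eq : ∀ (n : Nat) (num tong11 : Int), num.natAbs = n →
    tongCDLoop num tong11 = tong11 + pairSum (digitsLoop num) := by
  intro n
  induction n using Nat.strong_induction_on with
  | _ n ih =>
    intro num tong11 hn
    rw [tongCDLoop.eq_def, digitsLoop.eq_def]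
    by_cases h : num = 0
    · simp only [dif_pos h, pairSum]
      ring
    · simp only [dif_neg h]
      have hlt : (PySem.Int.truncdiv (PySem.Int.truncdiv num 10) 10).natAbs < n := by
        simp only [PySem.Int.truncdiv, Int.natAbs_tdiv]
        subst hn
        exact lt_of_le_of_lt (Nat.div_le_self _ _)
          (Nat.div_lt_self (Int.natAbs_pos.mpr h) (by norm_num))
      rw [ih _ hlt _ _ rfl]
      by_cases h1 : PySem.Int.truncdiv num 10 = 0
      · have e1 : PySem.Int.truncdiv (0 : Int) 10 = 0 := by decide
        have e2 : PySem.Int.mod (0 : Int) 10 = 0 := by decide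
        rw [h1, e1, e2, digitsLoop.eq_def]
        simp [pairSum]
      · conv_rhs => rw [digitsLoop.eq_def]
        rw [dif_neg h1]
        simp only [pairSum, digitsLoop_headD]
        split_ifs <;> ring

theorem sumLoop_eq : ∀ (n : Nat) (xs front : List Int) (total : Int), xs.length = n →
    sumLoop (front ++ xs) ((front.length : Int) + 1) total = total + pairSum xs := by
  intro n
  induction n using Nat.strong_induction_on with
  | _ n ih =>
    intro xs front total hn
    match xs, hn with
    | [], hn =>
        rw [sumLoop.eq_def, if_neg (by simp)]
        simp [pairSum]
    | [a], hn =>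
        rw [sumLoop.eq_def, if_neg (by simp)]
        simp [pairSum]
    | a :: b :: rest, hn =>
        have hrest : rest.length + 2 = n := by simpa using hn
        rw [sumLoop.eq_def]
        have hlen : ((front ++ a :: b :: rest).length : Int)
            = (front.length : Int) + (rest.length : Int) + 2 := by
          simp; ring
        rw [if_pos (by rw [hlen]; omega)]
        have hlo : PySem.List.pyGetD (front ++ a :: b :: rest) ((front.length : Int) + 1 - 1) 0 = a := by
          have e : (front.length : Int) + 1 - 1 = ((front.length : Nat) : Int) := by ring
          rw [e, PySem.List.pyGetD_natCast]
          simp [List.getD]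
        have hmid : PySem.List.pyGetD (front ++ a :: b :: rest) ((front.length : Int) + 1) 0 = b := by
          have e : (front.length : Int) + 1 = ((front.length + 1 : Nat) : Int) := by push_cast; ring
          rw [e, PySem.List.pyGetD_natCast]
          simp [List.getD]
        have hhi : (if (front.length : Int) + 1 + 1 < ((front ++ a :: b :: rest).length : Int)
              then PySem.List.pyGetD (front ++ a :: b :: rest) ((front.length : Int) + 1 + 1) 0 else 0)
            = rest.headD 0 := by
          cases rest with
          | nil => rw [if_neg (by rw [hlen]; simp only [List.length_nil]; push_cast; omega)]; rfl
          | cons c cs =>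
              rw [if_pos (by rw [hlen]; simp only [List.length_cons]; push_cast; omega)]
              have e : (front.length : Int) + 1 + 1 = ((front.length + 2 : Nat) : Int) := by push_cast; ring
              rw [e, PySem.List.pyGetD_natCast]
              simp [List.getD]
        simp only [hlo, hmid, hhi]
        have hsplit : front ++ a :: b :: rest = (front ++ [a, b]) ++ rest := by simp
        have hidx : (front.length : Int) + 1 + 2 = (((front ++ [a, b]).length : Nat) : Int) + 1 := by
          simp; ring
        rw [hsplit, hidx, ih rest.length (by omega) rest (front ++ [a, b]) _ rfl]
        simp only [pairSum]
        split_ifs <;> ring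

-- ===== VERDICT (by name: the statement is the Claim_ definition above) =====
theorem tongCD_spec : Claim_equal_tongCD := by
  intro num _
  show tongCD num = tongCD_alt num
  have hb : tongCD_alt num = 0 + pairSum (digitsLoop num) := by
    have := sumLoop_eq (digitsLoop num).length (digitsLoop num) [] 0 rfl
    simpa [tongCD_alt] using this
  rw [tongCD, tongCDLoop_eq num.natAbs num 0 rfl, hb]
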